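-- pv_equiv track=rewrite | github.com/scrimshawlife-ctrl/Abraxas | abraxas/modules/gtx/sim/metrics.py | defection_streaks
-- ===== SOURCE A (Python) =====
-- from typing import Dict, List, Tuple
--
-- Action = int
--
-- def defection_streaks(history: List[Tuple[Action, Action]]) -> Dict[str, int]:
--     def max_streak(seq: List[int]) -> int:
--         best = 0
--         current = 0
--         for x in seq:
--             if x == 1:
--                 current += 1
--                 best = max(best, current)
--             else:
--                 current = 0
--         return best
--
--     return {
--         "p1_max": max_streak([a1 for a1, _ in history]),
--         "p2_max": max_streak([a2 for _, a2 in history]),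
--     }
-- ===== SOURCE B (Python) =====
-- def defection_streaks(history):
--     def longest(seq):
--         # run-length encode the sequence, then take the max length of a run of 1s
--         runs = []  # list of [value, count]
--         for x in seq:
--             if runs and runs[-1][0] == x:
--                 runs[-1][1] += 1
--             else:
--                 runs.append([x, 1])
--         return max((n for v, n in runs if v == 1), default=0)
--
--     return {
--         "p1_max": longest([a1 for a1, _ in history]),
--         "p2_max": longest([a2 for _, a2 in history]),
--     }
-- ===== Notes on version B (the rewrite author's own statement) =====
-- stated objective: alternative
-- what changed: Replaced the running best/current counter with a two-phase run-length encoding: build maximal runs of equal values, then take the max length among runs of 1 (default 0).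
import Mathlib
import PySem

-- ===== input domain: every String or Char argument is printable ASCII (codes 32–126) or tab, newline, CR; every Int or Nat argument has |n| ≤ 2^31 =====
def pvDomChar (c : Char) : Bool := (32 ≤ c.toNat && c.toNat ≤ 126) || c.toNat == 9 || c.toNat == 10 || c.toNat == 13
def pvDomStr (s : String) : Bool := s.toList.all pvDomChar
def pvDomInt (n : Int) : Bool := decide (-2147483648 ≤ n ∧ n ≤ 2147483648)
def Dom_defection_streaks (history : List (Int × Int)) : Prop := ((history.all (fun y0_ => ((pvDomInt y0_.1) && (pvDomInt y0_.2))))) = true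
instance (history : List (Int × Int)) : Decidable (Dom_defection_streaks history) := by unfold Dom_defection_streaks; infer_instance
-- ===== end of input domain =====

-- B replaces A's running best/current counter with run-length encoding followed by a max
-- over the runs of 1 (objective: alternative, same cost). Equivalence of RETURN values.

-- ===== PORT A =====
-- A's inner loop: best/current counter state, updated element by element.
def pvMaxStreakA (seq : List Int) : Int :=
  (seq.foldl
    (fun (bc : Int × Int) x =>
      if x = 1 then (max bc.1 (bc.2 + 1), bc.2 + 1) else (bc.1, 0))
    (0, 0)).1

def defection_streaks (history : List (Int × Int)) : List (String × Int) :=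
  [("p1_max", pvMaxStreakA (history.map (fun p => p.1))),
   ("p2_max", pvMaxStreakA (history.map (fun p => p.2)))]

-- ===== PORT B =====
-- One step of run-length encoding: extend the most recent run or start a new one.
-- (runs are kept most-recent-first, mirroring Source B's runs[-1] access.)
def pvRleStep (runs : List (Int × Int)) (x : Int) : List (Int × Int) :=
  match runs with
  | (v, n) :: rest => if v = x then (v, n + 1) :: rest else (x, 1) :: (v, n) :: rest
  | [] => [(x, 1)]

-- Source B's max(... for v, n in runs if v == 1, default=0)
def pvMaxOneRun (runs : List (Int × Int)) : Int :=
  match runs with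
  | [] => 0
  | (v, n) :: rest => if v = 1 then max n (pvMaxOneRun rest) else pvMaxOneRun rest

def pvMaxStreakB (seq : List Int) : Int :=
  pvMaxOneRun (seq.foldl pvRleStep [])

def defection_streaks_alt (history : List (Int × Int)) : List (String × Int) :=
  [("p1_max", pvMaxStreakB (history.map (fun p => p.1))),
   ("p2_max", pvMaxStreakB (history.map (fun p => p.2)))]

-- ===== PRECONDITION & SPEC =====
def Spec_defection_streaks (history : List (Int × Int)) (out : List (String × Int)) : Prop := out = defection_streaks_alt history
instance (history : List (Int × Int)) (out : List (String × Int)) : Decidable (Spec_defection_streaks history out) := by unfold Spec_defection_streaks; infer_instance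

-- ===== CLAIM (what is proved, stated in full; the proofs are below) =====
def Claim_equal_defection_streaks : Prop := ∀ (history : List (Int × Int)), Dom_defection_streaks history → Spec_defection_streaks history (defection_streaks history)

-- ===== LEMMAS AND PROOFS =====

-- length of the most-recent run if it is a run of 1s, else 0: this is A's `current`.
def pvHeadOne (runs : List (Int × Int)) : Int :=
  match runs with
  | (v, n) :: _ => if v = 1 then n else 0
  | [] => 0

-- One loop step commutes: A's (best, current) state is determined by B's runs state.
theorem pvStep_commute (runs : List (Int × Int)) (x : Int) :
    (if x = 1 then (max (pvMaxOneRun runs) (pvHeadOne runs + 1), pvHeadOne runs + 1)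
     else (pvMaxOneRun runs, (0 : Int)))
    = (pvMaxOneRun (pvRleStep runs x), pvHeadOne (pvRleStep runs x)) := by
  cases runs with
  | nil =>
    by_cases hx : x = 1 <;> simp [pvRleStep, pvMaxOneRun, pvHeadOne, hx]
  | cons hd tl =>
    obtain ⟨v, n⟩ := hd
    by_cases hx : x = 1
    · subst hx
      by_cases hv : v = 1
      · subst hv
        simp [pvRleStep, pvMaxOneRun, pvHeadOne, Prod.ext_iff]
        omega
      · simp [pvRleStep, pvMaxOneRun, pvHeadOne, hv, Prod.ext_iff]
        omega
    · by_cases hv : v = x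
      · subst hv
        simp [pvRleStep, pvMaxOneRun, pvHeadOne, hx]
      · simp [pvRleStep, pvMaxOneRun, pvHeadOne, hx, hv]

theorem pvFoldl_invariant (l : List Int) (runs : List (Int × Int)) :
    l.foldl
      (fun (bc : Int × Int) x =>
        if x = 1 then (max bc.1 (bc.2 + 1), bc.2 + 1) else (bc.1, 0))
      (pvMaxOneRun runs, pvHeadOne runs)
    = (pvMaxOneRun (l.foldl pvRleStep runs), pvHeadOne (l.foldl pvRleStep runs)) := by
  induction l generalizing runs with
  | nil => rfl
  | cons x xs ih =>
    simp only [List.foldl_cons]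
    rw [show (if x = 1 then (max (pvMaxOneRun runs) (pvHeadOne runs + 1), pvHeadOne runs + 1)
          else (pvMaxOneRun runs, (0 : Int))) = _ from pvStep_commute runs x]
    exact ih (pvRleStep runs x)

theorem pvMaxStreak_eq (seq : List Int) : pvMaxStreakA seq = pvMaxStreakB seq := by
  unfold pvMaxStreakA pvMaxStreakB
  have h := pvFoldl_invariant seq []
  simp only [pvMaxOneRun, pvHeadOne] at h
  rw [h]

-- ===== VERDICT (by name: the statement is the Claim_ definition above) =====
theorem defection_streaks_spec : Claim_equal_defection_streaks := by
  intro history _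
  unfold Spec_defection_streaks defection_streaks defection_streaks_alt
  rw [pvMaxStreak_eq, pvMaxStreak_eq]
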